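-- pv_equiv track=rewrite | github.com/JamesParrott/sDNA_GH | sDNA_GH/sDNA_GH/custom/skel/tools/inserter.py | nick_names_that_map_to
-- ===== SOURCE A (Python) =====
-- def nick_names_that_map_to(names, name_map):
--     #type(list, dict) -> list
--     if isinstance(names, str):
--         names = [names]
--     #nick_names = [nick_name for nick_name, mapped_names in name_map._asdict().items()
--     #              if (nick_name not in names and
--     #                  any((name == mapped_names or name in mapped_names) for name in names))]
--     #nick_names += nick_names_that_map_to(nick_names, name_map)
--     #nick_names += names
--
--     nick_names = [nick_name for nick_name in name_map if name_map[nick_name] in names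
--                                                          and nick_name not in names
--                  ]
--     if nick_names == []:
--         return names
--     else:
--         return nick_names_that_map_to(nick_names + names, name_map)
-- ===== SOURCE B (Python) =====
-- def nick_names_that_map_to(names, name_map):
--     if isinstance(names, str):
--         names = [names]
--     known = set(names)
--     remaining = [(k, v) for k, v in name_map.items() if k not in known]
--     out = list(names)
--     while True:
--         picked = [k for k, v in remaining if v in known]
--         if not picked:
--             return out
--         remaining = [(k, v) for k, v in remaining if v not in known]
--         known.update(picked)
--         out = picked + out
-- ===== Notes on version B (the rewrite author's own statement) =====
-- stated objective: faster
-- what changed: A recursively rescans the whole dict each round and tests membership by O(n) list scans; B keeps a set of known names and a shrinking worklist of unprocessed entries, scanning each entry only until it is picked or its value is known, and prepends each round's picks to the output.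
import Mathlib
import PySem

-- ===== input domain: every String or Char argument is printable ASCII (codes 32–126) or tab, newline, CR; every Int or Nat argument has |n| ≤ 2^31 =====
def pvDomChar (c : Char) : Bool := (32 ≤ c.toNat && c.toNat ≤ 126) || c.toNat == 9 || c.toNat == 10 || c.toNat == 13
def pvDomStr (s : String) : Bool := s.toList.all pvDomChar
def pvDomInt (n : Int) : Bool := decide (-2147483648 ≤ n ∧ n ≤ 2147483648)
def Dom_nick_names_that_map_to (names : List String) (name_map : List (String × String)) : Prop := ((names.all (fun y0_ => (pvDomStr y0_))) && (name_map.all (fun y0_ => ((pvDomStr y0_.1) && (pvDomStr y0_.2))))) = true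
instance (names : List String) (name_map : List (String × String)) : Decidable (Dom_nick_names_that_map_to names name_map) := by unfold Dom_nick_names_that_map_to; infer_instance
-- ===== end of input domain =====

-- B replaces A's repeated rescans of the whole dict (with O(|names|) list membership)
-- by a worklist: a set of known names plus a shrinking list of unprocessed entries.

-- ===== PORT A =====
-- A iterates the dict's keys and looks each key up; with the distinct keys a Python
-- dict always has (Pre_ below), that is exactly iterating the (key, value) entries.
-- (The 'isinstance(names, str)' coercion has no counterpart under the type convention:
-- names : List String.)
-- A's list comprehension:
def pickA (names : List String) (name_map : List (String × String)) : List String :=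
  (name_map.filter (fun e => names.contains e.2 && !names.contains e.1)).map (·.1)

def nick_names_that_map_to (names : List String) (name_map : List (String × String)) : List String :=
  let nick_names := pickA names name_map
  if nick_names = [] then names
  else nick_names_that_map_to (nick_names ++ names) name_map
termination_by (name_map.filter (fun e => !names.contains e.1)).length
decreasing_by
  rename_i h
  have hsplit : name_map.filter (fun e => !(nick_names ++ names).contains e.1)
      = (name_map.filter (fun e => !names.contains e.1)).filter (fun e => !nick_names.contains e.1) := by
    rw [List.filter_filter]
    apply List.filter_congr
    intro a _
    rw [Bool.eq_iff_iff]
    simp [List.mem_append]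
  rw [hsplit]
  apply List.length_filter_lt_length_iff_exists.mpr
  have hne : name_map.filter (fun e => names.contains e.2 && !names.contains e.1) ≠ [] := by
    intro hnil
    apply h
    show pickA names name_map = []
    unfold pickA
    rw [hnil]
    rfl
  obtain ⟨e, he⟩ := List.exists_mem_of_ne_nil _ hne
  have he' := List.mem_filter.mp he
  obtain ⟨_, h1⟩ := Bool.and_eq_true_iff.mp he'.2
  refine ⟨e, List.mem_filter.mpr ⟨he'.1, h1⟩, ?_⟩
  have hmem : e.1 ∈ nick_names := by
    show e.1 ∈ pickA names name_map
    unfold pickA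
    exact List.mem_map_of_mem he
  simp [hmem]

-- ===== PORT B =====
-- the two list comprehensions of Source B's loop body:
def pickB (known : PySem.Set String) (remaining : List (String × String)) : List String :=
  (remaining.filter (fun e => PySem.Set.contains known e.2)).map (·.1)

def restB (known : PySem.Set String) (remaining : List (String × String)) : List (String × String) :=
  remaining.filter (fun e => !PySem.Set.contains known e.2)

-- the 'while True' loop of Source B
def altLoopB (remaining : List (String × String)) (known : PySem.Set String) (out : List String) : List String :=
  let picked := pickB known remaining
  if picked = [] then out
  else altLoopB (restB known remaining) (PySem.Set.update known picked) (picked ++ out)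
termination_by remaining.length
decreasing_by
  rename_i h
  unfold restB
  apply List.length_filter_lt_length_iff_exists.mpr
  have hne : remaining.filter (fun e => PySem.Set.contains known e.2) ≠ [] := by
    intro hnil
    apply h
    show pickB known remaining = []
    unfold pickB
    rw [hnil]
    rfl
  obtain ⟨e, he⟩ := List.exists_mem_of_ne_nil _ hne
  have he' := List.mem_filter.mp he
  refine ⟨e, he'.1, ?_⟩
  simp
  exact List.contains_iff_mem.mp he'.2

def nick_names_that_map_to_alt (names : List String) (name_map : List (String × String)) : List String :=
  let known := PySem.Set.ofList names
  let remaining := name_map.filter (fun e => !PySem.Set.contains known e.1)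
  altLoopB remaining known names

-- ===== PRECONDITION & SPEC =====
-- name_map is a Python dict, whose keys are necessarily distinct; a duplicate-key
-- association list corresponds to no Python input, so Pre_ excludes none of A's inputs.
def Pre_nick_names_that_map_to (names : List String) (name_map : List (String × String)) : Prop :=
  (name_map.map Prod.fst).Nodup
instance (names : List String) (name_map : List (String × String)) : Decidable (Pre_nick_names_that_map_to names name_map) := by unfold Pre_nick_names_that_map_to; infer_instance

def pvWitness_nick_names_that_map_to : List String × (List (String × String)) :=
  (["a"], [("b", "a"), ("c", "b"), ("d", "x")])

def Spec_nick_names_that_map_to (names : List String) (name_map : List (String × String)) (out : List String) : Prop := out = nick_names_that_map_to_alt names name_map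
instance (names : List String) (name_map : List (String × String)) (out : List String) : Decidable (Spec_nick_names_that_map_to names name_map out) := by unfold Spec_nick_names_that_map_to; infer_instance

-- ===== CLAIM (what is proved, stated in full; the proofs are below) =====
def Claim_equal_nick_names_that_map_to : Prop := ∀ (names : List String) (name_map : List (String × String)), Dom_nick_names_that_map_to names name_map → Pre_nick_names_that_map_to names name_map → Spec_nick_names_that_map_to names name_map (nick_names_that_map_to names name_map)

-- ===== LEMMAS AND PROOFS =====

lemma contains_ofList (xs : List String) (x : String) :
    PySem.Set.contains (PySem.Set.ofList xs) x = xs.contains x := by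
  rw [Bool.eq_iff_iff]
  constructor
  · intro h
    exact List.contains_iff_mem.mpr ((PySem.Set.mem_ofList xs x).mp (List.contains_iff_mem.mp h))
  · intro h
    exact List.contains_iff_mem.mpr ((PySem.Set.mem_ofList xs x).mpr (List.contains_iff_mem.mp h))

-- B's round picks exactly A's comprehension
lemma pickB_eq (name_map : List (String × String)) (N : List String) (K : PySem.Set String)
    (hK : ∀ x, PySem.Set.contains K x = N.contains x) :
    pickB K (name_map.filter (fun e => !N.contains e.1)) = pickA N name_map := by
  unfold pickB pickA
  simp only [hK]
  rw [List.filter_filter]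

-- with distinct keys, dropping the entries whose value is known drops exactly the
-- entries whose key was just picked
lemma restB_eq (name_map : List (String × String)) (hn : (name_map.map Prod.fst).Nodup)
    (N : List String) (K : PySem.Set String)
    (hK : ∀ x, PySem.Set.contains K x = N.contains x) :
    restB K (name_map.filter (fun e => !N.contains e.1))
      = name_map.filter (fun e => !(pickA N name_map ++ N).contains e.1) := by
  unfold restB
  simp only [hK]
  rw [List.filter_filter]
  apply List.filter_congr
  intro a ha
  have hmem : a.1 ∈ pickA N name_map ↔ (a.2 ∈ N ∧ a.1 ∉ N) := by
    constructor
    · intro h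
      simp only [pickA, List.mem_map] at h
      obtain ⟨e, he, hfst⟩ := h
      have hef := List.mem_filter.mp he
      obtain ⟨h2, h1⟩ := Bool.and_eq_true_iff.mp hef.2
      have heq : e = a := List.inj_on_of_nodup_map hn hef.1 ha hfst
      subst heq
      constructor
      · exact List.contains_iff_mem.mp h2
      · simpa using h1
    · intro ⟨h2, h1⟩
      simp only [pickA, List.mem_map]
      refine ⟨a, List.mem_filter.mpr ⟨ha, ?_⟩, rfl⟩
      simp [h1, h2]
  rw [Bool.eq_iff_iff]
  simp [List.mem_append, hmem]
  tauto

-- adding the picked keys to the known set tracks appending them to names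
lemma update_contains (K : PySem.Set String) (N L : List String)
    (hK : ∀ x, PySem.Set.contains K x = N.contains x) :
    ∀ y, PySem.Set.contains (PySem.Set.update K L) y = (L ++ N).contains y := by
  intro y
  have h : (y ∈ K) ↔ (y ∈ N) := by
    have h := hK y
    simp at h
    exact h
  rw [Bool.eq_iff_iff]
  constructor
  · intro hy
    have := (PySem.Set.mem_update K L y).mp (List.contains_iff_mem.mp hy)
    apply List.contains_iff_mem.mpr
    rw [List.mem_append]
    tauto
  · intro hy
    have := List.mem_append.mp (List.contains_iff_mem.mp hy)
    apply List.contains_iff_mem.mpr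
    apply (PySem.Set.mem_update K L y).mpr
    tauto

lemma altLoopB_eq (name_map : List (String × String)) (hn : (name_map.map Prod.fst).Nodup) :
    ∀ (names : List String) (K : PySem.Set String),
    (∀ x, PySem.Set.contains K x = names.contains x) →
    altLoopB (name_map.filter (fun e => !names.contains e.1)) K names
      = nick_names_that_map_to names name_map := by
  intro names
  induction names using nick_names_that_map_to.induct (name_map := name_map) with
  | case1 x _ hnil =>
    intro K hK
    rw [altLoopB, nick_names_that_map_to]
    simp only [pickB_eq name_map x K hK]
    rw [if_pos hnil, if_pos hnil]
  | case2 x _ hne ih =>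
    intro K hK
    rw [altLoopB, nick_names_that_map_to]
    simp only [pickB_eq name_map x K hK]
    rw [if_neg hne, if_neg hne]
    rw [restB_eq name_map hn x K hK]
    exact ih (PySem.Set.update K (pickA x name_map)) (update_contains K x (pickA x name_map) hK)

-- ===== VERDICT (by name: the statement is the Claim_ definition above) =====
theorem nick_names_that_map_to_spec : Claim_equal_nick_names_that_map_to := by
  intro names name_map _hdom hpre
  unfold Spec_nick_names_that_map_to
  show nick_names_that_map_to names name_map
      = altLoopB (name_map.filter (fun e => !PySem.Set.contains (PySem.Set.ofList names) e.1))
          (PySem.Set.ofList names) names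
  rw [show (name_map.filter (fun e => !PySem.Set.contains (PySem.Set.ofList names) e.1))
        = name_map.filter (fun e => !names.contains e.1) from
      List.filter_congr (fun e _ => by rw [contains_ofList])]
  exact (altLoopB_eq name_map hpre names (PySem.Set.ofList names) (fun x => contains_ofList names x)).symm
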